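-- pv_equiv track=rewrite | github.com/NVlabs/SMCP | smcp/sparse_ops/channel_structure.py | _group_consolidate
-- ===== SOURCE A (Python) =====
-- from typing import Callable, Dict, Iterable, List, Optional, Set, Tuple, Type, TypeVar
--
-- TElt = TypeVar("TElt")
--
-- def _group_consolidate(groups: List[Set[TElt]]) -> List[Set[TElt]]:
--     # Taken from http://rosettacode.org/wiki/Set_consolidation#Python
--     if len(groups) < 2:
--         return [g for g in groups if len(g) > 0]
--     elif len(groups[0]) == 0:
--         return _group_consolidate(groups[1:])
--
--     r, b = [groups[0]], _group_consolidate(groups[1:])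
--     for x in b:
--         if r[0].intersection(x):
--             r[0].update(x)
--         elif len(x) > 0:
--             r.append(x)
--
--     return r
-- ===== SOURCE B (Python) =====
-- from typing import List, Set, TypeVar
--
-- TElt = TypeVar("TElt")
--
-- def _group_consolidate(groups: List[Set[TElt]]) -> List[Set[TElt]]:
--     # Iterative one-pass (over reversed input) consolidation with an
--     # element -> component-id index: no recursion, no list slicing, and no
--     # per-level intersection scan of every component.
--     where = {}   # element -> id of the component containing it
--     comps = {}   # id -> component (a set)
--     order = []   # live component ids, output order
--     nxt = 0
--     for g in reversed(groups):
--         if not g: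
--             continue
--         hit = {where[e] for e in g if e in where}
--         new = set(g)
--         if hit:
--             keep = []
--             for i in order:
--                 if i in hit:
--                     new |= comps[i]
--                     del comps[i]
--                 else:
--                     keep.append(i)
--             order = keep
--         nid = nxt
--         nxt += 1
--         comps[nid] = new
--         order = [nid] + order
--         for e in new:
--             where[e] = nid
--     return [comps[i] for i in order]
-- ===== Notes on version B (the rewrite author's own statement) =====
-- stated objective: alternative
-- what changed: A's recursive consolidation (slice groups[1:] per level, then intersect the head set against every component of the recursive result) is replaced by a single iterative pass over reversed(groups) that keeps an element->component-id dict, so intersecting components are found by dict lookups on the group's elements instead of per-component intersection scans; A also mutates the caller's sets in place while B does not (return values are identical).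
import Mathlib
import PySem

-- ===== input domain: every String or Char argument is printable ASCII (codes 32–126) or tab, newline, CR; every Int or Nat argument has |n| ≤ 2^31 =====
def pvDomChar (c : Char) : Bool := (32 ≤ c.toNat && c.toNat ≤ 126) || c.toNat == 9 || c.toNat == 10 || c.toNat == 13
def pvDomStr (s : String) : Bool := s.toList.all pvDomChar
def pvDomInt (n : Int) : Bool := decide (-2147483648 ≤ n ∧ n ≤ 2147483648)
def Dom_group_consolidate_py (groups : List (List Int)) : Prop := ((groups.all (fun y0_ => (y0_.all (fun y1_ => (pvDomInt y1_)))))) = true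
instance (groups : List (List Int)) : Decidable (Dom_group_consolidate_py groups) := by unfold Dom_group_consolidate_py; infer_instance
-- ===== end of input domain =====

-- Alternative implementation: A's recursion (slice groups[1:] per level, intersect the head set
-- with every component of the recursive result) becomes one iterative pass over the reversed input
-- with an element→component-id dict. Return values agree; NOTE: Python A mutates the caller's sets
-- in place (r[0].update), B does not — the equivalence proved is about the RETURN value only.

-- ===== PORT A =====
-- loop body of A's `for x in b:`; p is r as (r[0], r[1:])
def gcAStep (p : List Int × List (List Int)) (x : List Int) : List Int × List (List Int) :=
  if PySem.Set.inter p.1 x ≠ [] then (PySem.Set.update p.1 x, p.2)      -- if r[0].intersection(x): r[0].update(x)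
  else if 0 < x.length then (p.1, p.2 ++ [x])                           -- elif len(x) > 0: r.append(x)
  else p

def gcAcore : List (List Int) → List (List Int)
  | [] => []
  | g0 :: rest =>
    if (g0 :: rest).length < 2 then (g0 :: rest).filter (fun g => decide (0 < g.length))
    else if g0.length = 0 then gcAcore rest
    else
      let b := gcAcore rest
      let rb := b.foldl gcAStep (g0, [])
      rb.1 :: rb.2

def group_consolidate_py (groups : List (List Int)) : List (List Int) :=
  gcAcore (groups.map (fun g => PySem.Set.ofList g))    -- the List[Set] argument: each inner list is a Python set

-- ===== PORT B =====
-- loop body of B's `for i in order:`; p = (new, comps, keep).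
-- Python's `comps[i]` is ported as `getD i []`: i is always a live key here (else Python raises KeyError).
def gcBLoop (hit : PySem.Set Int) (p : List Int × PySem.Dict Int (List Int) × List Int) (i : Int) :
    List Int × PySem.Dict Int (List Int) × List Int :=
  if PySem.Set.contains hit i then (PySem.Set.update p.1 (p.2.1.getD i []), p.2.1.erase i, p.2.2)
  else (p.1, p.2.1, p.2.2 ++ [i])

-- B's merge block: `hit = {where[e] for e in g if e in where}`, `new = set(g)`, the `for i in order:` loop
def gcBMerge (w : PySem.Dict Int Int) (c : PySem.Dict Int (List Int)) (o : List Int) (g : List Int) :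
    List Int × PySem.Dict Int (List Int) × List Int :=
  let hit : PySem.Set Int := PySem.Set.ofList (g.filterMap (fun e => w.get? e))
  if hit ≠ [] then o.foldl (gcBLoop hit) (PySem.Set.ofList g, c, [])
  else (PySem.Set.ofList g, c, o)

-- loop body of B's `for g in reversed(groups):`; state = (where, comps, order, nxt)
def gcBStep (st : PySem.Dict Int Int × PySem.Dict Int (List Int) × List Int × Int) (g : List Int) :
    PySem.Dict Int Int × PySem.Dict Int (List Int) × List Int × Int :=
  match st with
  | (w, c, o, n) =>
    if g.length = 0 then (w, c, o, n)                                   -- if not g: continue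
    else
      let res := gcBMerge w c o g
      (res.1.foldl (fun (w' : PySem.Dict Int Int) e => w'.insert e n) w,    -- for e in new: where[e] = nid
       res.2.1.insert n res.1,                                              -- comps[nid] = new
       n :: res.2.2,                                                       -- order = [nid] + order
       n + 1)

def group_consolidate_py_alt (groups : List (List Int)) : List (List Int) :=
  let fin := ((groups.map (fun g => PySem.Set.ofList g)).reverse).foldl gcBStep
      (PySem.Dict.empty, PySem.Dict.empty, ([] : List Int), (0 : Int))
  fin.2.2.1.map (fun i => fin.2.1.getD i [])                            -- [comps[i] for i in order]

-- ===== PRECONDITION & SPEC =====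
def Spec_group_consolidate_py (groups : List (List Int)) (out : List (List Int)) : Prop := out = group_consolidate_py_alt groups
instance (groups : List (List Int)) (out : List (List Int)) : Decidable (Spec_group_consolidate_py groups out) := by unfold Spec_group_consolidate_py; infer_instance

-- ===== CLAIM (what is proved, stated in full; the proofs are below) =====
def Claim_equal_group_consolidate_py : Prop := ∀ (groups : List (List Int)), Dom_group_consolidate_py groups → Spec_group_consolidate_py groups (group_consolidate_py groups)

-- ===== LEMMAS AND PROOFS =====

-- A's merge of one group into an already-consolidated list (the body of A's else branch)
def gcAmerge (g : List Int) (b : List (List Int)) : List (List Int) :=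
  if g.length = 0 then b
  else
    let rb := b.foldl gcAStep (g, [])
    rb.1 :: rb.2

-- the components held in B's state, in output order
def gcView (c : PySem.Dict Int (List Int)) (o : List Int) : List (List Int) :=
  o.map (fun i => c.getD i [])

-- well-formedness of B's state
def gcWF (w : PySem.Dict Int Int) (c : PySem.Dict Int (List Int)) (o : List Int) (n : Int) : Prop :=
  o.Nodup ∧ (∀ i ∈ o, i < n) ∧ (∀ i ∈ o, c.getD i [] ≠ [] ∧ (c.getD i []).Nodup) ∧
  (∀ e i, w.get? e = some i ↔ (i ∈ o ∧ e ∈ c.getD i []))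

lemma gcA_cons (g : List Int) (t : List (List Int)) :
    gcAcore (g :: t) = gcAmerge g (gcAcore t) := by
  cases t with
  | nil =>
    by_cases hg : g = [] <;>
      simp [gcAcore, gcAmerge, hg, List.length_eq_zero_iff, List.length_pos_iff]
  | cons h t' =>
    by_cases hg : g.length = 0
    · simp [gcAcore, gcAmerge, hg]
    · simp [gcAcore, gcAmerge, hg]

lemma gc_touch_iff (s x : List Int) : (PySem.Set.inter s x ≠ []) ↔ ∃ e ∈ s, e ∈ x := by
  rw [← List.isEmpty_eq_false_iff, List.isEmpty_eq_false_iff_exists_mem]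
  constructor
  · rintro ⟨e, he⟩
    exact ⟨e, (PySem.Set.mem_inter s x e).mp he⟩
  · rintro ⟨e, hs, hx⟩
    exact ⟨e, (PySem.Set.mem_inter s x e).mpr ⟨hs, hx⟩⟩

lemma gc_mem_foldl_update {β : Type} (f : β → List Int) (l : List β) (s : List Int) (e : Int) :
    e ∈ List.foldl (fun s i => PySem.Set.update s (f i)) s l ↔ e ∈ s ∨ ∃ x ∈ l, e ∈ f x := by
  induction l generalizing s with
  | nil => simp
  | cons x l ih =>
    simp only [List.foldl_cons, ih, PySem.Set.mem_update, List.mem_cons]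
    constructor
    · rintro ((h | h) | h)
      · exact Or.inl h
      · exact Or.inr ⟨x, Or.inl rfl, h⟩
      · obtain ⟨y, hy, hey⟩ := h; exact Or.inr ⟨y, Or.inr hy, hey⟩
    · rintro (h | ⟨y, (rfl | hy), hey⟩)
      · exact Or.inl (Or.inl h)
      · exact Or.inl (Or.inr hey)
      · exact Or.inr ⟨y, hy, hey⟩

lemma gc_nodup_foldl_update {β : Type} (f : β → List Int) (l : List β) (s : List Int) (hs : s.Nodup) :
    (List.foldl (fun s i => PySem.Set.update s (f i)) s l).Nodup := by
  induction l generalizing s with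
  | nil => exact hs
  | cons x l ih => exact ih _ (PySem.Set.nodup_update s (f x) hs)

-- A's fold over an already-consolidated b: merge exactly the components meeting g, keep the rest
lemma gc_afold (g : List Int) :
    ∀ (b : List (List Int)) (s : List Int) (r : List (List Int)),
    (∀ x ∈ b, x ≠ []) →
    List.Pairwise (fun x y => ∀ e, e ∈ x → e ∉ y) b →
    (∀ x ∈ b, ((∃ e ∈ s, e ∈ x) ↔ (∃ e ∈ g, e ∈ x))) →
    b.foldl gcAStep (s, r) =
      (List.foldl PySem.Set.update s (b.filter (fun x => decide (∃ e ∈ g, e ∈ x))),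
       r ++ b.filter (fun x => !decide (∃ e ∈ g, e ∈ x))) := by
  intro b
  induction b with
  | nil => intro s r _ _ _; simp
  | cons x b ih =>
    intro s r hne hpw hs
    have hpw' := (List.pairwise_cons.mp hpw).2
    have hdisj := (List.pairwise_cons.mp hpw).1
    by_cases hx : ∃ e ∈ g, e ∈ x
    · have hsx : PySem.Set.inter s x ≠ [] := by
        rw [gc_touch_iff]; exact (hs x (List.mem_cons_self)).mpr hx
      have hstep : gcAStep (s, r) x = (PySem.Set.update s x, r) := by
        simp [gcAStep, hsx]
      rw [List.foldl_cons, hstep, ih (PySem.Set.update s x) r (fun y hy => hne y (List.mem_cons_of_mem _ hy)) hpw'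
        (by
          intro y hy
          rw [← hs y (List.mem_cons_of_mem _ hy)]
          constructor
          · rintro ⟨e, heu, hey⟩
            rcases (PySem.Set.mem_update s x e).mp heu with h | h
            · exact ⟨e, h, hey⟩
            · exact absurd hey (hdisj y hy e h)
          · rintro ⟨e, hes, hey⟩
            exact ⟨e, (PySem.Set.mem_update s x e).mpr (Or.inl hes), hey⟩)]
      simp [hx]
    · have hsx : ¬ (PySem.Set.inter s x ≠ []) := by
        rw [gc_touch_iff]
        intro h; exact hx ((hs x (List.mem_cons_self)).mp h)
      have hxne : 0 < x.length := List.length_pos_iff.mpr (hne x (List.mem_cons_self))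
      have hstep : gcAStep (s, r) x = (s, r ++ [x]) := by
        simp [gcAStep, hsx, hxne]
      rw [List.foldl_cons, hstep, ih s (r ++ [x]) (fun y hy => hne y (List.mem_cons_of_mem _ hy)) hpw'
        (fun y hy => hs y (List.mem_cons_of_mem _ hy))]
      simp [hx]

-- Dict facts the prelude does not list: erase, erase loops and a constant-value insert loop
lemma gc_find?_filter_ne (l : List (Int × List Int)) (k k' : Int) (h : k' ≠ k) :
    List.find? (fun p => p.1 == k') (List.filter (fun p => !(p.1 == k)) l)
      = List.find? (fun p => p.1 == k') l := by
  induction l with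
  | nil => rfl
  | cons p l ih =>
    rw [List.filter_cons]
    by_cases hp : p.1 = k
    · rw [if_neg (by simp [hp]), ih, List.find?_cons_of_neg (by simp [hp, Ne.symm h])]
    · rw [if_pos (by simp [hp])]
      by_cases hp' : p.1 = k'
      · rw [List.find?_cons_of_pos (by simp [hp']), List.find?_cons_of_pos (by simp [hp'])]
      · rw [List.find?_cons_of_neg (by simp [hp']), List.find?_cons_of_neg (by simp [hp']), ih]

lemma gc_get?_erase_of_ne (d : PySem.Dict Int (List Int)) (k k' : Int) (h : k' ≠ k) :
    (d.erase k).get? k' = d.get? k' := by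
  obtain ⟨l⟩ := d
  simp only [PySem.Dict.erase, PySem.Dict.get?]
  rw [gc_find?_filter_ne l k k' h]

lemma gc_getD_erase_of_ne (d : PySem.Dict Int (List Int)) (k k' : Int) (h : k' ≠ k) :
    (d.erase k).getD k' [] = d.getD k' [] := by
  simp [PySem.Dict.getD, gc_get?_erase_of_ne d k k' h]

lemma gc_getD_foldl_erase_of_not_mem (l : List Int) (c : PySem.Dict Int (List Int)) (i : Int)
    (h : i ∉ l) :
    (l.foldl (fun (c : PySem.Dict Int (List Int)) j => c.erase j) c).getD i [] = c.getD i [] := by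
  induction l generalizing c with
  | nil => rfl
  | cons j l ih =>
    simp only [List.foldl_cons]
    rw [ih _ (fun hm => h (List.mem_cons_of_mem _ hm)),
      gc_getD_erase_of_ne _ _ _ (by rintro rfl; exact h List.mem_cons_self)]

lemma gc_get?_foldl_insert_const (l : List Int) (w : PySem.Dict Int Int) (v e : Int) :
    (l.foldl (fun (w : PySem.Dict Int Int) x => w.insert x v) w).get? e
      = if e ∈ l then some v else w.get? e := by
  induction l generalizing w with
  | nil => simp
  | cons x l ih =>
    simp only [List.foldl_cons, ih, List.mem_cons]
    by_cases hel : e ∈ l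
    · simp [hel]
    · by_cases hex : e = x
      · simp [hex, PySem.Dict.get?_insert_self]
      · simp [hex, hel, PySem.Dict.get?_insert_of_ne _ _ hex]

-- B's inner loop over `order`, characterised against the ORIGINAL comps dict
lemma gc_bfold (hit : PySem.Set Int) :
    ∀ (o : List Int) (s : List Int) (c : PySem.Dict Int (List Int)) (k : List Int),
    o.Nodup →
    o.foldl (gcBLoop hit) (s, c, k) =
      (List.foldl (fun s i => PySem.Set.update s (c.getD i [])) s
          (o.filter (fun i => PySem.Set.contains hit i)),
       List.foldl (fun (c : PySem.Dict Int (List Int)) i => c.erase i) c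
          (o.filter (fun i => PySem.Set.contains hit i)),
       k ++ o.filter (fun i => !PySem.Set.contains hit i)) := by
  intro o
  induction o with
  | nil => intro s c k _; simp
  | cons i o ih =>
    intro s c k hnd
    have hio : i ∉ o := (List.nodup_cons.mp hnd).1
    have hnd' : o.Nodup := (List.nodup_cons.mp hnd).2
    by_cases hi : PySem.Set.contains hit i = true
    · have him : i ∈ hit := (PySem.Set.contains_iff hit i).mp hi
      have hstep : gcBLoop hit (s, c, k) i
          = (PySem.Set.update s (c.getD i []), c.erase i, k) := by
        simp only [gcBLoop]; rw [if_pos hi]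
      rw [List.foldl_cons, hstep, ih _ _ _ hnd']
      rw [List.filter_cons, List.filter_cons, if_pos hi,
        if_neg (by simp [him] : ¬ ((!PySem.Set.contains hit i) = true))]
      rw [List.foldl_cons, List.foldl_cons]
      have h1 : List.foldl (fun s j => PySem.Set.update s ((c.erase i).getD j []))
            (PySem.Set.update s (c.getD i [])) (o.filter (fun j => PySem.Set.contains hit j))
          = List.foldl (fun s j => PySem.Set.update s (c.getD j []))
            (PySem.Set.update s (c.getD i [])) (o.filter (fun j => PySem.Set.contains hit j)) := by
        apply PySem.List.foldl_congr_mem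
        intro acc j hj
        rw [gc_getD_erase_of_ne _ _ _ (by rintro rfl; exact hio (List.mem_of_mem_filter hj))]
      rw [h1]
    · have him : i ∉ hit := fun hm => hi ((PySem.Set.contains_iff hit i).mpr hm)
      have hstep : gcBLoop hit (s, c, k) i = (s, c, k ++ [i]) := by
        simp only [gcBLoop]; rw [if_neg hi]
      rw [List.foldl_cons, hstep, ih _ _ _ hnd']
      rw [List.filter_cons, List.filter_cons, if_neg hi,
        if_pos (by simp [him] : (!PySem.Set.contains hit i) = true)]
      rw [List.append_assoc]
      rfl

-- membership of the hit set
lemma gc_hit_contains (w : PySem.Dict Int Int) (g : List Int) (i : Int) :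
    PySem.Set.contains (PySem.Set.ofList (g.filterMap (fun e => w.get? e))) i = true
      ↔ ∃ e ∈ g, w.get? e = some i := by
  rw [PySem.Set.contains_iff, PySem.Set.mem_ofList, List.mem_filterMap]

-- one merge of B (with the state well-formed) = one merge step of A, and well-formedness is kept
lemma gc_step_aux
    (w : PySem.Dict Int Int) (c : PySem.Dict Int (List Int)) (o : List Int) (n : Int)
    (hnd : o.Nodup) (hlt : ∀ i ∈ o, i < n)
    (hcomp : ∀ i ∈ o, c.getD i [] ≠ [] ∧ (c.getD i []).Nodup)
    (hiff : ∀ e i, w.get? e = some i ↔ (i ∈ o ∧ e ∈ c.getD i []))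
    (g : List Int) (hg : g.Nodup) (hg' : g ≠ [])
    (hit : PySem.Set Int) (hhit : hit = PySem.Set.ofList (g.filterMap (fun e => w.get? e))) :
    gcWF ((List.foldl (fun s i => PySem.Set.update s (c.getD i [])) g
            (o.filter (fun i => PySem.Set.contains hit i))).foldl
          (fun (w' : PySem.Dict Int Int) e => w'.insert e n) w)
      ((List.foldl (fun (c : PySem.Dict Int (List Int)) j => c.erase j) c
          (o.filter (fun i => PySem.Set.contains hit i))).insert n
        (List.foldl (fun s i => PySem.Set.update s (c.getD i [])) g
          (o.filter (fun i => PySem.Set.contains hit i))))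
      (n :: o.filter (fun i => !PySem.Set.contains hit i)) (n + 1) ∧
    gcView ((List.foldl (fun (c : PySem.Dict Int (List Int)) j => c.erase j) c
          (o.filter (fun i => PySem.Set.contains hit i))).insert n
        (List.foldl (fun s i => PySem.Set.update s (c.getD i [])) g
          (o.filter (fun i => PySem.Set.contains hit i))))
      (n :: o.filter (fun i => !PySem.Set.contains hit i))
      = gcAmerge g (gcView c o) := by
  set hc : Int → Bool := fun i => PySem.Set.contains hit i with hhc
  set S : List Int := List.foldl (fun s i => PySem.Set.update s (c.getD i [])) g (o.filter hc) with hS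
  set C1 : PySem.Dict Int (List Int) :=
    List.foldl (fun (c : PySem.Dict Int (List Int)) j => c.erase j) c (o.filter hc) with hC1
  set K : List Int := o.filter (fun i => !hc i) with hK
  have hKsub : ∀ i ∈ K, i ∈ o := fun i hi => List.mem_of_mem_filter hi
  have hKfalse : ∀ i ∈ K, hc i = false := by
    intro i hi
    have := (List.mem_filter.mp hi).2
    simpa using this
  have hdisj : ∀ i ∈ o, ∀ j ∈ o, ∀ e, e ∈ c.getD i [] → e ∈ c.getD j [] → i = j := by
    intro i hi j hj e hei hej
    have h1 := (hiff e i).mpr ⟨hi, hei⟩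
    have h2 := (hiff e j).mpr ⟨hj, hej⟩
    exact Option.some.inj (h1.symm.trans h2)
  have hhciff : ∀ i ∈ o, (hc i = true ↔ ∃ e ∈ g, e ∈ c.getD i []) := by
    intro i hi
    show PySem.Set.contains hit i = true ↔ _
    rw [hhit, gc_hit_contains]
    constructor
    · rintro ⟨e, he, hw⟩; exact ⟨e, he, ((hiff e i).mp hw).2⟩
    · rintro ⟨e, he, hei⟩; exact ⟨e, he, (hiff e i).mpr ⟨hi, hei⟩⟩
  have hhceq : ∀ i ∈ o, hc i = decide (∃ e ∈ g, e ∈ c.getD i []) := by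
    intro i hi
    by_cases hP : ∃ e ∈ g, e ∈ c.getD i []
    · simp [hP, (hhciff i hi).mpr hP]
    · have h1 : hc i ≠ true := fun ht => hP ((hhciff i hi).mp ht)
      simp [hP, Bool.eq_false_iff.mpr h1]
  have hSmem : ∀ e, e ∈ S ↔ e ∈ g ∨ ∃ j ∈ o.filter hc, e ∈ c.getD j [] := by
    intro e
    rw [hS, gc_mem_foldl_update (fun i => c.getD i [])]
  have hSne : S ≠ [] := by
    obtain ⟨e, he⟩ := List.exists_mem_of_ne_nil g hg'
    exact List.ne_nil_of_mem ((hSmem e).mpr (Or.inl he))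
  have hSnd : S.Nodup := by
    rw [hS]; exact gc_nodup_foldl_update _ _ _ hg
  have hglen : ¬ (g.length = 0) := by simpa [List.length_eq_zero_iff] using hg'
  have hgetC2 : (C1.insert n S).getD n [] = S := PySem.Dict.getD_insert_self C1 n S []
  have hgetK : ∀ i ∈ K, (C1.insert n S).getD i [] = c.getD i [] := by
    intro i hi
    have hin : i ≠ n := fun h => by
      have := hlt i (hKsub i hi); omega
    rw [PySem.Dict.getD_insert_of_ne C1 S [] hin, hC1,
      gc_getD_foldl_erase_of_not_mem _ _ _ (fun hm => by
        have := (List.mem_filter.mp hm).2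
        rw [hKfalse i hi] at this
        exact Bool.false_ne_true this)]
  have hW2 : ∀ e, (S.foldl (fun (w' : PySem.Dict Int Int) e => w'.insert e n) w).get? e
      = if e ∈ S then some n else w.get? e := fun e => gc_get?_foldl_insert_const S w n e
  constructor
  · -- well-formedness of the new state
    refine ⟨?_, ?_, ?_, ?_⟩
    · rw [List.nodup_cons]
      exact ⟨fun hn => by have := hlt n (hKsub n hn); omega, hnd.filter _⟩
    · intro i hi
      rcases List.mem_cons.mp hi with rfl | hiK
      · omega
      · have := hlt i (hKsub i hiK); omega
    · intro i hi
      rcases List.mem_cons.mp hi with rfl | hiK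
      · rw [hgetC2]; exact ⟨hSne, hSnd⟩
      · rw [hgetK i hiK]; exact hcomp i (hKsub i hiK)
    · intro e i
      rw [hW2 e]
      by_cases heS : e ∈ S
      · rw [if_pos heS]
        constructor
        · intro h
          obtain rfl : n = i := Option.some.inj h
          exact ⟨List.mem_cons_self, by rw [hgetC2]; exact heS⟩
        · rintro ⟨hi, hei⟩
          rcases List.mem_cons.mp hi with rfl | hiK
          · rfl
          · exfalso
            rw [hgetK i hiK] at hei
            rcases (hSmem e).mp heS with heg | ⟨j, hj, hej⟩
            · have h1 := (hhciff i (hKsub i hiK)).mpr ⟨e, heg, hei⟩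
              rw [hKfalse i hiK] at h1
              exact Bool.false_ne_true h1
            · have hji : j = i :=
                hdisj j (List.mem_of_mem_filter hj) i (hKsub i hiK) e hej hei
              have h1 := (List.mem_filter.mp hj).2
              rw [hji, hKfalse i hiK] at h1
              exact Bool.false_ne_true h1
      · rw [if_neg heS, hiff e i]
        constructor
        · rintro ⟨hio, hei⟩
          have hci : hc i = false := by
            rcases h : hc i with _ | _
            · rfl
            · exact absurd ((hSmem e).mpr (Or.inr ⟨i, List.mem_filter.mpr ⟨hio, h⟩, hei⟩)) heS
          have hiK : i ∈ K := List.mem_filter.mpr ⟨hio, by simp [hci]⟩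
          exact ⟨List.mem_cons_of_mem _ hiK, by rw [hgetK i hiK]; exact hei⟩
        · rintro ⟨hi, hei⟩
          rcases List.mem_cons.mp hi with rfl | hiK
          · rw [hgetC2] at hei; exact absurd hei heS
          · rw [hgetK i hiK] at hei
            exact ⟨hKsub i hiK, hei⟩
  · -- the produced components are exactly A's merge step
    have hL : gcView (C1.insert n S) (n :: K) = S :: K.map (fun i => c.getD i []) := by
      simp only [gcView, List.map_cons]
      refine congrArg₂ List.cons hgetC2 ?_
      exact List.map_congr_left hgetK
    have hbne : ∀ x ∈ gcView c o, x ≠ [] := by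
      intro x hx
      obtain ⟨i, hi, rfl⟩ := List.mem_map.mp hx
      exact (hcomp i hi).1
    have hbpw : List.Pairwise (fun x y => ∀ e, e ∈ x → e ∉ y) (gcView c o) := by
      refine List.pairwise_map.mpr ?_
      refine hnd.imp_of_mem ?_
      intro i j hi hj hne e hei hej
      exact hne (hdisj i hi j hj e hei hej)
    have hb := gc_afold g (gcView c o) g [] hbne hbpw (fun x _ => Iff.rfl)
    have hfilt1 : (gcView c o).filter (fun x => decide (∃ e ∈ g, e ∈ x))
        = (o.filter hc).map (fun i => c.getD i []) := by
      show (List.map (fun i => c.getD i []) o).filter _ = _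
      rw [List.filter_map]
      refine congrArg _ ?_
      refine List.filter_congr ?_
      intro i hi
      exact (hhceq i hi).symm
    have hfilt2 : (gcView c o).filter (fun x => !decide (∃ e ∈ g, e ∈ x))
        = K.map (fun i => c.getD i []) := by
      show (List.map (fun i => c.getD i []) o).filter _ = _
      rw [List.filter_map, hK]
      refine congrArg _ ?_
      refine List.filter_congr ?_
      intro i hi
      have := hhceq i hi
      simp only [Function.comp]
      rw [this]
    rw [hL]
    simp only [gcAmerge]
    rw [if_neg hglen]
    rw [hb, hfilt1, hfilt2, List.foldl_map]
    rw [List.nil_append]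

-- one step of B performs exactly one merge step of A and preserves well-formedness
lemma gc_step_main (g : List Int) (hg : g.Nodup)
    (st : PySem.Dict Int Int × PySem.Dict Int (List Int) × List Int × Int)
    (hwf : gcWF st.1 st.2.1 st.2.2.1 st.2.2.2) :
    gcWF (gcBStep st g).1 (gcBStep st g).2.1 (gcBStep st g).2.2.1 (gcBStep st g).2.2.2 ∧
      gcView (gcBStep st g).2.1 (gcBStep st g).2.2.1 = gcAmerge g (gcView st.2.1 st.2.2.1) := by
  obtain ⟨w, c, o, n⟩ := st
  obtain ⟨hnd, hlt, hcomp, hiff⟩ := hwf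
  by_cases hg0 : g.length = 0
  · have hgnil : g = [] := List.length_eq_zero_iff.mp hg0
    subst hgnil
    constructor
    · exact ⟨hnd, hlt, hcomp, hiff⟩
    · simp [gcBStep, gcAmerge]
  · have hg' : g ≠ [] := fun h => hg0 (by simp [h])
    have hofg : PySem.Set.ofList g = g := PySem.Set.ofList_eq_self_of_nodup g hg
    have hres0 : gcBMerge w c o g =
        (List.foldl (fun s i => PySem.Set.update s (c.getD i [])) g
          (o.filter (fun i => PySem.Set.contains (PySem.Set.ofList (g.filterMap (fun e => w.get? e))) i)),
         List.foldl (fun (c : PySem.Dict Int (List Int)) j => c.erase j) c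
          (o.filter (fun i => PySem.Set.contains (PySem.Set.ofList (g.filterMap (fun e => w.get? e))) i)),
         o.filter (fun i => !PySem.Set.contains (PySem.Set.ofList (g.filterMap (fun e => w.get? e))) i)) := by
      simp only [gcBMerge]
      by_cases hh : PySem.Set.ofList (g.filterMap (fun e => w.get? e)) = []
      · rw [if_neg (by simpa using hh)]
        have hfm : g.filterMap (fun e => w.get? e) = [] := by
          by_contra hne
          obtain ⟨x, hx⟩ := List.exists_mem_of_ne_nil _ hne
          have hmem : x ∈ PySem.Set.ofList (g.filterMap (fun e => w.get? e)) :=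
            (PySem.Set.mem_ofList _ x).mpr hx
          rw [hh] at hmem
          exact absurd hmem (List.not_mem_nil)
        have hnone : ∀ x ∈ g, w.get? x = none := by
          intro x hx
          cases hwx : w.get? x with
          | none => rfl
          | some a =>
            exfalso
            have : a ∈ g.filterMap (fun e => w.get? e) := List.mem_filterMap.mpr ⟨x, hx, hwx⟩
            rw [hfm] at this
            exact absurd this (List.not_mem_nil)
        have hcf : ∀ a, PySem.Set.contains (PySem.Set.ofList (g.filterMap (fun e => w.get? e))) a = false := by
          intro a
          rcases hca : PySem.Set.contains (PySem.Set.ofList (g.filterMap (fun e => w.get? e))) a with _ | _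
          · rfl
          · exfalso
            obtain ⟨e, he, hw⟩ := (gc_hit_contains w g a).mp hca
            rw [hnone e he] at hw
            exact (Option.some_ne_none a hw.symm)
        have h1 : o.filter (fun i => PySem.Set.contains (PySem.Set.ofList (g.filterMap (fun e => w.get? e))) i) = [] :=
          List.filter_eq_nil_iff.mpr (fun a _ => by rw [hcf a]; simp)
        have h2 : o.filter (fun i => !PySem.Set.contains (PySem.Set.ofList (g.filterMap (fun e => w.get? e))) i) = o :=
          List.filter_eq_self.mpr (fun a _ => by rw [hcf a]; rfl)
        rw [h1, h2, List.foldl_nil, List.foldl_nil, hofg]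
      · rw [if_pos hh, gc_bfold _ o _ c [] hnd, hofg, List.nil_append]
    have hstep : gcBStep (w, c, o, n) g =
        ((List.foldl (fun s i => PySem.Set.update s (c.getD i [])) g
            (o.filter (fun i => PySem.Set.contains (PySem.Set.ofList (g.filterMap (fun e => w.get? e))) i))).foldl
          (fun (w' : PySem.Dict Int Int) e => w'.insert e n) w,
         (List.foldl (fun (c : PySem.Dict Int (List Int)) j => c.erase j) c
            (o.filter (fun i => PySem.Set.contains (PySem.Set.ofList (g.filterMap (fun e => w.get? e))) i))).insert n
          (List.foldl (fun s i => PySem.Set.update s (c.getD i [])) g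
            (o.filter (fun i => PySem.Set.contains (PySem.Set.ofList (g.filterMap (fun e => w.get? e))) i))),
         n :: o.filter (fun i => !PySem.Set.contains (PySem.Set.ofList (g.filterMap (fun e => w.get? e))) i),
         n + 1) := by
      simp only [gcBStep]
      rw [if_neg hg0, hres0]
    rw [hstep]
    exact gc_step_aux w c o n hnd hlt hcomp hiff g hg hg' _ rfl

-- folding B over the reversed input reproduces A's recursion
lemma gc_run (gs : List (List Int)) (h : ∀ g ∈ gs, g.Nodup) :
    gcWF (gs.reverse.foldl gcBStep (PySem.Dict.empty, PySem.Dict.empty, ([] : List Int), (0 : Int))).1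
        (gs.reverse.foldl gcBStep (PySem.Dict.empty, PySem.Dict.empty, ([] : List Int), (0 : Int))).2.1
        (gs.reverse.foldl gcBStep (PySem.Dict.empty, PySem.Dict.empty, ([] : List Int), (0 : Int))).2.2.1
        (gs.reverse.foldl gcBStep (PySem.Dict.empty, PySem.Dict.empty, ([] : List Int), (0 : Int))).2.2.2 ∧
      gcView (gs.reverse.foldl gcBStep (PySem.Dict.empty, PySem.Dict.empty, ([] : List Int), (0 : Int))).2.1
        (gs.reverse.foldl gcBStep (PySem.Dict.empty, PySem.Dict.empty, ([] : List Int), (0 : Int))).2.2.1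
        = gcAcore gs := by
  induction gs with
  | nil =>
    constructor
    · refine ⟨List.nodup_nil, by simp, by simp, ?_⟩
      intro e i
      simp [PySem.Dict.get?_empty]
    · simp [gcView, gcAcore]
  | cons g t ih =>
    have ht := ih (fun x hx => h x (List.mem_cons_of_mem _ hx))
    rw [List.reverse_cons, List.foldl_append, List.foldl_cons, List.foldl_nil]
    have := gc_step_main g (h g List.mem_cons_self) _ ht.1
    rw [gcA_cons, ← ht.2]
    exact this

-- ===== VERDICT (by name: the statement is the Claim_ definition above) =====
theorem group_consolidate_py_spec : Claim_equal_group_consolidate_py := by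
  intro groups _
  unfold Spec_group_consolidate_py group_consolidate_py group_consolidate_py_alt
  have h := gc_run (groups.map (fun g => PySem.Set.ofList g))
    (by intro g hg; obtain ⟨g0, _, rfl⟩ := List.mem_map.mp hg; exact PySem.Set.nodup_ofList g0)
  exact (h.2).symm
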